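-- pv_equiv track=rewrite | github.com/Beyond-Endoscopy/Artluxe_version1 | upcoming_scraper/preprocess.py | reverse_dic
-- ===== SOURCE A (Python) =====
-- def reverse_dic(dic):
--     result = {}
--     for key in dic:
--         if dic[key] not in result:
--             result[dic[key]] = key
--         else:
--             result[dic[key]] = result[dic[key]] + ', ' + key
--     return result
-- ===== SOURCE B (Python) =====
-- def reverse_dic(dic):
--     group = {}
--     for key in dic:
--         group.setdefault(dic[key], []).append(key)
--     return {value: ', '.join(keys) for value, keys in group.items()}
-- ===== Notes on version B (the rewrite author's own statement) =====
-- stated objective: idiomatic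
-- what changed: Instead of growing each output string by repeated concatenation inside one loop over the dict, B first groups keys by value into lists via setdefault in one pass and then builds the result with a dict comprehension joining each list with ', ' once.
import Mathlib
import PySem

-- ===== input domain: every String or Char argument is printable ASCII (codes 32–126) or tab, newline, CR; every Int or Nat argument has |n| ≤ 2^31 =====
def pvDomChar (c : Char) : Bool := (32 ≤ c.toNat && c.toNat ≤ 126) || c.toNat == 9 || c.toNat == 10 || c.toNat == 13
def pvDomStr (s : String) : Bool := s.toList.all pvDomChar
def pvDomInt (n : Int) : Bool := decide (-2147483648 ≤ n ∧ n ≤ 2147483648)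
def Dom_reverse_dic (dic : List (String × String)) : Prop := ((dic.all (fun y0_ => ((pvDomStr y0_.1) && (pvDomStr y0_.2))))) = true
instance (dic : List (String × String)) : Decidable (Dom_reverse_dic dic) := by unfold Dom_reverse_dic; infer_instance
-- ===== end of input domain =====

-- B groups keys by value into lists in one pass and joins each list with ', ' once,
-- instead of A's repeated string concatenation into the result dict (objective: idiomatic group-then-join).


-- ===== PORT A =====
def reverse_dic (dic : List (String × String)) : List (String × String) :=
  (dic.foldl (fun r p =>
      if r.contains p.2 = false then r.insert p.2 p.1
      else r.insert p.2 (r.getD p.2 "" ++ ", " ++ p.1))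
    PySem.Dict.empty).items

-- ===== PORT B =====
def reverse_dic_alt (dic : List (String × String)) : List (String × String) :=
  let group : PySem.Dict String (List String) :=
    dic.foldl (fun g p => g.modify p.2 [] (fun ks => ks ++ [p.1])) PySem.Dict.empty
  group.items.map (fun q => (q.1, PySem.Str.join ", " q.2))

-- ===== PRECONDITION & SPEC =====
def Spec_reverse_dic (dic : List (String × String)) (out : List (String × String)) : Prop := out = reverse_dic_alt dic
instance (dic : List (String × String)) (out : List (String × String)) : Decidable (Spec_reverse_dic dic out) := by unfold Spec_reverse_dic; infer_instance

-- ===== CLAIM (what is proved, stated in full; the proofs are below) =====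
def Claim_equal_reverse_dic : Prop := ∀ (dic : List (String × String)), Dom_reverse_dic dic → Spec_reverse_dic dic (reverse_dic dic)

-- ===== LEMMAS AND PROOFS =====

-- A's result dict is B's group dict with every key-list joined.
def pvMapJoin (g : PySem.Dict String (List String)) : PySem.Dict String String :=
  PySem.Dict.mk (g.items.map (fun q => (q.1, PySem.Str.join ", " q.2)))

theorem pvJoin_singleton (k : String) : PySem.Str.join ", " [k] = k := by
  simp [PySem.Str.join, PySem.Chars.join, List.intercalate]

theorem pvIntercalate_append_singleton (a sep x : List Char) (tl : List (List Char)) :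
    sep.intercalate ((a :: tl) ++ [x]) = sep.intercalate (a :: tl) ++ sep ++ x := by
  induction tl generalizing a with
  | nil => simp [List.intercalate, List.intersperse]
  | cons b tb ih =>
    have h1 : sep.intercalate (a :: b :: (tb ++ [x])) = a ++ sep ++ sep.intercalate (b :: (tb ++ [x])) := by
      simp [List.intercalate, List.intersperse]
    have h2 : sep.intercalate (a :: b :: tb) = a ++ sep ++ sep.intercalate (b :: tb) := by
      simp [List.intercalate, List.intersperse]
    simp only [List.cons_append] at *
    rw [h1, h2, ih b]
    simp

theorem pvJoin_append (ks : List String) (k : String) (h : ks ≠ []) :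
    PySem.Str.join ", " (ks ++ [k]) = PySem.Str.join ", " ks ++ ", " ++ k := by
  cases ks with
  | nil => exact absurd rfl h
  | cons a tl =>
    simp only [PySem.Str.join, PySem.Chars.join, List.map_append, List.map_cons, List.map_nil]
    rw [show a.toList :: (tl.map String.toList) ++ [k.toList]
          = (a.toList :: tl.map String.toList) ++ [k.toList] from rfl,
        pvIntercalate_append_singleton]
    simp only [String.ofList_append, String.ofList_toList]

theorem pvMapJoin_contains (g : PySem.Dict String (List String)) (v : String) :
    (pvMapJoin g).contains v = g.contains v := by
  simp [pvMapJoin, PySem.Dict.contains, List.any_map, Function.comp_def]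

theorem pvMapJoin_get? (g : PySem.Dict String (List String)) (v : String) :
    (pvMapJoin g).get? v = (g.get? v).map (PySem.Str.join ", ") := by
  simp only [pvMapJoin, PySem.Dict.get?, List.find?_map, Function.comp_def]
  cases g.1.find? (fun p => p.1 == v) <;> simp

theorem pvMapJoin_insert (g : PySem.Dict String (List String)) (v : String) (ws : List String) :
    pvMapJoin (g.insert v ws) = (pvMapJoin g).insert v (PySem.Str.join ", " ws) := by
  unfold PySem.Dict.insert
  rw [pvMapJoin_contains]
  by_cases hc : g.contains v = true
  · simp only [hc, if_pos]
    unfold pvMapJoin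
    simp only [List.map_map]
    congr 1
    apply List.map_congr_left
    intro q _
    by_cases hqv : q.1 = v <;> simp [hqv]
  · simp only [hc, Bool.false_eq_true, if_neg, not_false_iff]
    simp [pvMapJoin]

-- one loop step of A on the joined dict = the joined result of one loop step of B
theorem pvStep (g : PySem.Dict String (List String)) (k v : String)
    (hinv : ∀ q ∈ g.items, q.2 ≠ []) :
    (if (pvMapJoin g).contains v = false then (pvMapJoin g).insert v k
     else (pvMapJoin g).insert v ((pvMapJoin g).getD v "" ++ ", " ++ k))
    = pvMapJoin (g.modify v [] (fun ks => ks ++ [k])) := by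
  rw [pvMapJoin_contains]
  unfold PySem.Dict.modify
  by_cases hc : g.contains v = true
  · simp only [hc, if_neg, Bool.true_eq_false, not_false_iff]
    obtain ⟨p, hp⟩ : ∃ p, g.items.find? (fun q => q.1 == v) = some p := by
      have : (g.get? v).isSome := by
        rw [← PySem.Dict.contains_eq_isSome_get?]; exact hc
      simp only [PySem.Dict.get?, Option.isSome_map] at this
      exact Option.isSome_iff_exists.mp this
    have hks : g.get? v = some p.2 := by simp [PySem.Dict.get?, hp]
    have hne : p.2 ≠ [] := hinv p (List.mem_of_find?_eq_some hp)
    have hgetD : g.getD v [] = p.2 := by simp [PySem.Dict.getD, hks]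
    have hgetD' : (pvMapJoin g).getD v "" = PySem.Str.join ", " p.2 := by
      simp [PySem.Dict.getD, pvMapJoin_get?, hks]
    rw [hgetD, hgetD', pvMapJoin_insert, ← pvJoin_append p.2 k hne]
  · have hcf : g.contains v = false := by simpa using hc
    rw [if_pos hcf]
    have hcf' : ∀ q ∈ g.items, ¬ (q.1 == v) = true := by
      simpa only [PySem.Dict.contains, List.any_eq_false] using hcf
    have hgetD : g.getD v [] = [] := by
      simp [PySem.Dict.getD, PySem.Dict.get?, List.find?_eq_none.mpr hcf']
    rw [hgetD, pvMapJoin_insert]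
    simp [pvJoin_singleton]

theorem pvInv_step (g : PySem.Dict String (List String)) (k v : String)
    (hinv : ∀ q ∈ g.items, q.2 ≠ []) :
    ∀ q ∈ (g.modify v [] (fun ks => ks ++ [k])).items, q.2 ≠ [] := by
  intro q hq
  unfold PySem.Dict.modify at hq
  rcases (PySem.Dict.mem_items_insert g v _ q).mp hq with h | h
  · subst h; simp
  · exact hinv q h.1

theorem pvMain (dic : List (String × String)) :
    ∀ (g : PySem.Dict String (List String)), (∀ q ∈ g.items, q.2 ≠ []) →
    dic.foldl (fun r p =>
      if r.contains p.2 = false then r.insert p.2 p.1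
      else r.insert p.2 (r.getD p.2 "" ++ ", " ++ p.1)) (pvMapJoin g)
    = pvMapJoin (dic.foldl (fun g p => g.modify p.2 [] (fun ks => ks ++ [p.1])) g) := by
  induction dic with
  | nil => intro g _; rfl
  | cons p rest ih =>
    intro g hinv
    simp only [List.foldl_cons]
    rw [pvStep g p.1 p.2 hinv]
    exact ih _ (pvInv_step g p.1 p.2 hinv)

-- ===== VERDICT (by name: the statement is the Claim_ definition above) =====
theorem reverse_dic_spec : Claim_equal_reverse_dic := by
  intro dic _
  unfold Spec_reverse_dic reverse_dic reverse_dic_alt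
  have h := pvMain dic PySem.Dict.empty (by intro q hq; simp [PySem.Dict.empty] at hq)
  have he : pvMapJoin PySem.Dict.empty = PySem.Dict.empty := by rfl
  rw [he] at h
  rw [h]
  rfl
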